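-- pv_equiv track=rewrite | github.com/WuLC/LeetCode | Algorithm/Python/954. Array of Doubled Pairs.py | canReorderDoubled
-- ===== SOURCE A (Python) =====
-- from collections import Counter
--
-- def canReorderDoubled(A):
--     """
--     :type A: List[int]
--     :rtype: bool
--     """
--     count = Counter(A)
--     nums = sorted(count.keys())
--     for num in nums:
--         if count[num] == 0:
--             continue
--         if num < 0:
--             if num % 2 != 0 or num/2 not in count or count[num/2] < count[num]:
--                 return False
--             else:
--                 count[num/2] -= count[num]
--                 count[num] = 0
--         else:
--             if num*2 not in count or count[num*2] < count[num]:
--                 return False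
--             else:
--                 count[num*2] -= count[num]
--                 count[num] = 0
--     return True
-- ===== SOURCE B (Python) =====
-- from collections import Counter
--
-- def canReorderDoubled(A):
--     """
--     :type A: List[int]
--     :rtype: bool
--     """
--     count = Counter(A)
--
--     def residual(x):
--         # copies of x left unpaired after x absorbed the residual of its
--         # halved chain-neighbour x/2 (chains of keys x/2, x, 2x, ... under doubling)
--         if x != 0 and x % 2 == 0 and x // 2 in count:
--             return count[x] - residual(x // 2)
--         return count[x]
--
--     return all(residual(x) <= count[2 * x] for x in count)
-- ===== Notes on version B (the rewrite author's own statement) =====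
-- stated objective: faster
-- what changed: A runs a stateful greedy: sort the Counter keys ascending and mutate counts in a sign-split loop (negatives paired downward with num/2 after a parity check, positives upward with num*2); B mutates nothing and does no sorting at all: it computes for each distinct key x a recursively defined residual along the halving chain (residual(x) = count[x] - residual(x/2) when x/2 is a key) and checks residual(x) <= count[2*x] for every key, in no particular order.
import Mathlib
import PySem

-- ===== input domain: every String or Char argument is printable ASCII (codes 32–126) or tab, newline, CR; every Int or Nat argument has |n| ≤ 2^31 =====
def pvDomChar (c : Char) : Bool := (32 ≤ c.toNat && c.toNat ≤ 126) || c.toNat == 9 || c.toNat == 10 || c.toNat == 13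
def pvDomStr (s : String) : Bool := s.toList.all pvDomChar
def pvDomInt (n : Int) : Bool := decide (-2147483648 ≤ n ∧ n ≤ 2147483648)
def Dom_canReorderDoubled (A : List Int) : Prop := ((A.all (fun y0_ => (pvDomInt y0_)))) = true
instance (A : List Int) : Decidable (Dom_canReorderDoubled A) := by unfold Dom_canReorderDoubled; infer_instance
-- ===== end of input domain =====

-- B replaces A's stateful sign-split greedy (sorted keys, mutated counts) by a stateless
-- check: a recursively defined residual along each halving chain, compared against
-- count[2*x] for every distinct key; same return value, no sorting and no mutation.

-- ===== PORT A =====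
-- One loop step of A (early 'return False' = none).  Python's 'num/2' is float division,
-- but it is reached only after 'num % 2 != 0 or' has short-circuited, so num is even and
-- num/2 equals the exact integer quotient; dict membership/indexing by the float -x.0
-- coincides with that by the int, so it is ported as PySem.Int.floordiv num 2 (exact here).
def pvStepA : Option (PySem.Dict Int Int) → Int → Option (PySem.Dict Int Int)
  | none, _ => none
  | some c, num =>
    if c.getD num 0 = 0 then some c
    else if num < 0 then
      (if PySem.Int.mod num 2 ≠ 0 then none
       else if ¬ (c.contains (PySem.Int.floordiv num 2) = true) then none
       else if c.getD (PySem.Int.floordiv num 2) 0 < c.getD num 0 then none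
       else some ((c.insert (PySem.Int.floordiv num 2)
                    (c.getD (PySem.Int.floordiv num 2) 0 - c.getD num 0)).insert num 0))
    else
      (if ¬ (c.contains (num * 2) = true) then none
       else if c.getD (num * 2) 0 < c.getD num 0 then none
       else some ((c.insert (num * 2) (c.getD (num * 2) 0 - c.getD num 0)).insert num 0))

def canReorderDoubled (A : List Int) : Bool :=
  let count := PySem.Dict.counter A
  let nums := PySem.List.sorted count.keys (fun x => x) false
  match nums.foldl pvStepA (some count) with
  | none => false
  | some _ => true

-- ===== PORT B =====
-- Source B's inner 'residual': copies of x left unpaired after x absorbed the residual of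
-- its halved chain-neighbour x/2.  'x % 2 == 0' is PySem.Int.mod, 'x // 2' is floordiv,
-- 'in count' / 'count[...]' are Dict.contains / Dict.getD _ 0 (Counter's missing-key read).
def pvResidual (count : PySem.Dict Int Int) (x : Int) : Int :=
  if h : x ≠ 0 ∧ PySem.Int.mod x 2 = 0 ∧ count.contains (PySem.Int.floordiv x 2) = true then
    count.getD x 0 - pvResidual count (PySem.Int.floordiv x 2)
  else count.getD x 0
  termination_by x.natAbs
  decreasing_by
    obtain ⟨h0, hmod, _⟩ := h
    obtain ⟨k, hk⟩ := (PySem.Int.mod_eq_zero_iff_dvd x 2).mp hmod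
    rw [PySem.Int.floordiv_eq_ediv_of_pos (by norm_num)]
    subst hk
    rw [Int.mul_ediv_cancel_left _ (by norm_num)]
    have : (2 * k).natAbs = 2 * k.natAbs := by rw [Int.natAbs_mul]; norm_num
    omega

def canReorderDoubled_alt (A : List Int) : Bool :=
  let count := PySem.Dict.counter A
  count.keys.all (fun x => decide (pvResidual count x ≤ count.getD (2 * x) 0))

-- ===== PRECONDITION & SPEC =====
def Spec_canReorderDoubled (A : List Int) (out : Bool) : Prop := out = canReorderDoubled_alt A
instance (A : List Int) (out : Bool) : Decidable (Spec_canReorderDoubled A out) := by unfold Spec_canReorderDoubled; infer_instance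

-- ===== CLAIM (what is proved, stated in full; the proofs are below) =====
def Claim_equal_canReorderDoubled : Prop := ∀ (A : List Int), Dom_canReorderDoubled A → Spec_canReorderDoubled A (canReorderDoubled A)

-- ===== LEMMAS AND PROOFS =====

-- multiplicity of y in the input, as an Int
def pvCnt (l : List Int) (y : Int) : Int := (l.count y : Int)

-- residual of key y in the "upward" pairing (B everywhere; A on nonnegatives):
-- what is left at y after its lower chain neighbour y/2 pushed its own residual into y
def pvU (l : List Int) (y : Int) : Int :=
  if h : y ≠ 0 ∧ (2 : Int) ∣ y ∧ y / 2 ∈ l then pvCnt l y - pvU l (y / 2) else pvCnt l y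
  termination_by y.natAbs
  decreasing_by
    obtain ⟨h0, ⟨k, hk⟩, _⟩ := h
    subst hk
    rw [Int.mul_ediv_cancel_left _ (by norm_num)]
    have : (2 * k).natAbs = 2 * k.natAbs := by rw [Int.natAbs_mul]; norm_num
    omega

-- fuelled residual of key y in A's "downward" greedy on negatives
def pvVf (l : List Int) : Nat → Int → Int
  | 0, y => pvCnt l y
  | f + 1, y => pvCnt l y - (if y < 0 ∧ 2 * y ∈ l then pvVf l f (2 * y) else 0)

def pvV (l : List Int) (y : Int) : Int := pvVf l 33 y

-- the two programs' conditions, per key, in closed form over the input only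
def pvCondB (l : List Int) (y : Int) : Prop := pvU l y ≤ pvCnt l (2 * y)

def pvCondA (l : List Int) (y : Int) : Prop :=
  if y < 0 then pvV l y ≤ (if (2 : Int) ∣ y then pvCnt l (y / 2) else 0)
  else pvU l y ≤ pvCnt l (2 * y)

-- the key order A's pass uses
def pvKsA (l : List Int) : List Int := PySem.List.sorted (PySem.Set.ofList l) (fun x => x) false

-- counter state after A has processed the keys in `done`
def pvStA (l done : List Int) (y : Int) : Int :=
  if y ∈ done then 0
  else if y < 0 then pvCnt l y - (if 2 * y ∈ done then pvV l (2 * y) else 0)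
  else pvCnt l y - (if y ≠ 0 ∧ (2 : Int) ∣ y ∧ y / 2 ∈ l ∧ y / 2 ∈ done then pvU l (y / 2) else 0)

lemma pvCnt_nonneg (l : List Int) (y : Int) : 0 ≤ pvCnt l y := Int.natCast_nonneg _

lemma pvCnt_eq_zero (l : List Int) (y : Int) (h : y ∉ l) : pvCnt l y = 0 := by
  simp [pvCnt, List.count_eq_zero_of_not_mem h]

lemma pvU_eq (l : List Int) (y : Int) :
    pvU l y = if y ≠ 0 ∧ (2 : Int) ∣ y ∧ y / 2 ∈ l then pvCnt l y - pvU l (y / 2) else pvCnt l y := by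
  rw [pvU]; split <;> rfl

lemma pvHalf_mul (y : Int) (h : (2 : Int) ∣ y) : 2 * (y / 2) = y := Int.mul_ediv_cancel' h

lemma pvDouble_div (x : Int) : 2 * x / 2 = x := Int.mul_ediv_cancel_left _ (by norm_num)

lemma pvHalf_neg (y : Int) (h : y < 0) (h2 : (2 : Int) ∣ y) : y / 2 < 0 := by
  obtain ⟨k, hk⟩ := h2; subst hk; rw [pvDouble_div]; omega

lemma pvHalf_gt (y : Int) (h : y < 0) (h2 : (2 : Int) ∣ y) : y < y / 2 := by
  obtain ⟨k, hk⟩ := h2; subst hk; rw [pvDouble_div]; omega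

lemma pvHalf_lt (y : Int) (h : 0 < y) : y / 2 < y := by omega

-- 0 ≤ u y, given B's condition at the lower neighbour y/2
lemma pvU_nonneg (l : List Int) (y : Int)
    (H : y ≠ 0 → (2 : Int) ∣ y → y / 2 ∈ l → pvU l (y / 2) ≤ pvCnt l y) : 0 ≤ pvU l y := by
  rw [pvU_eq]
  split
  · next h => have := H h.1 h.2.1 h.2.2; omega
  · exact pvCnt_nonneg l y

-- chains of negatives die within d halvings of the 2^31 bound: pvVf is fuel-stable there
lemma pvVf_stab (l : List Int) (hD : ∀ z ∈ l, (-2147483648 : Int) ≤ z) :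
    ∀ (d : Nat) (y : Int) (f g : Nat), 2 ^ d * y < -2147483648 → d ≤ f → d ≤ g →
      pvVf l f y = pvVf l g y := by
  intro d
  induction d with
  | zero =>
    intro y f g hy _ _
    simp only [pow_zero, one_mul] at hy
    have hnl : 2 * y ∉ l := by
      intro hmem; have := hD _ hmem; omega
    have hval : ∀ f : Nat, pvVf l f y = pvCnt l y := by
      intro f; cases f with
      | zero => rfl
      | succ f => simp [pvVf, hnl]
    rw [hval f, hval g]
  | succ d ih =>
    intro y f g hy hf hg
    cases f with
    | zero => omega
    | succ f =>
      cases g with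
      | zero => omega
      | succ g =>
        simp only [pvVf]
        congr 1
        split
        · next h =>
          exact ih (2 * y) f g (by rw [pow_succ] at hy; linarith [hy]) (by omega) (by omega)
        · rfl

-- the defining equation of v, on negative keys, inside the domain bound
lemma pvVf_succ (l : List Int) (f : Nat) (y : Int) :
    pvVf l (f + 1) y = pvCnt l y - (if y < 0 ∧ 2 * y ∈ l then pvVf l f (2 * y) else 0) := rfl

lemma pvV_eq (l : List Int) (hD : ∀ z ∈ l, (-2147483648 : Int) ≤ z) (y : Int) (hy : y < 0) :
    pvV l y = pvCnt l y - (if 2 * y ∈ l then pvV l (2 * y) else 0) := by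
  unfold pvV
  have h33 : (33 : Nat) = 32 + 1 := by norm_num
  rw [h33, pvVf_succ]
  simp only [hy, true_and]
  by_cases hm : 2 * y ∈ l
  · rw [if_pos hm, if_pos hm,
      pvVf_stab l hD 32 (2 * y) 32 (32 + 1)
        (by have h32 : (2 : Int) ^ 32 = 4294967296 := by norm_num
            rw [h32]; omega)
        (by omega) (by omega)]
  · rw [if_neg hm, if_neg hm]

-- 0 ≤ v y, given A's condition at the upper neighbour 2y
lemma pvV_nonneg (l : List Int) (hD : ∀ z ∈ l, (-2147483648 : Int) ≤ z) (y : Int) (hy : y < 0)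
    (H : 2 * y ∈ l → pvV l (2 * y) ≤ pvCnt l y) : 0 ≤ pvV l y := by
  rw [pvV_eq l hD y hy]
  split
  · next h => have := H h; omega
  · have := pvCnt_nonneg l y; omega

lemma pvKsA_nodup (l : List Int) : (pvKsA l).Nodup :=
  (PySem.List.sorted_perm _ _ _).nodup_iff.mpr (PySem.Set.nodup_ofList l)

lemma pvKsA_mem (l : List Int) (y : Int) : y ∈ pvKsA l ↔ y ∈ l := by
  unfold pvKsA; rw [PySem.List.mem_sorted, PySem.Set.mem_ofList]

lemma pvKsA_pairwise (l : List Int) : (pvKsA l).Pairwise (· < ·) :=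
  PySem.List.sorted_ofList_pairwise_lt l

lemma pvFoldA_none (ks : List Int) : ks.foldl pvStepA none = none := by
  induction ks with
  | nil => rfl
  | cons x r ih => simpa [pvStepA] using ih

lemma pvGetD_insert2 (d : PySem.Dict Int Int) (a b va vb y : Int) :
    ((d.insert a va).insert b vb).getD y 0 = if y = b then vb else if y = a then va else d.getD y 0 := by
  rw [PySem.Dict.getD_insert, PySem.Dict.getD_insert]

lemma pvForall_cons {P : Int → Prop} (x : Int) (r : List Int) (hx : P x) :
    (∀ y ∈ r, P y) ↔ (∀ y ∈ x :: r, P y) := by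
  constructor
  · intro H y hy
    rcases List.mem_cons.mp hy with rfl | h
    · exact hx
    · exact H y h
  · intro H y hy; exact H y (List.mem_cons_of_mem _ hy)

lemma pvHalfEqZero (y : Int) (h0 : y ≠ 0) (h2 : (2 : Int) ∣ y) : y / 2 ≠ 0 := by
  intro hc
  have := pvHalf_mul y h2
  rw [hc] at this
  omega

-- the values of the A state function
lemma pvStA_val_mem (l done : List Int) (y : Int) (h : y ∈ done) : pvStA l done y = 0 := by
  unfold pvStA; rw [if_pos h]

lemma pvStA_val_neg_src (l done : List Int) (y : Int) (h : y ∉ done) (hy : y < 0)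
    (hg : 2 * y ∈ done) : pvStA l done y = pvCnt l y - pvV l (2 * y) := by
  unfold pvStA; rw [if_neg h, if_pos hy, if_pos hg]

lemma pvStA_val_neg_nosrc (l done : List Int) (y : Int) (h : y ∉ done) (hy : y < 0)
    (hg : 2 * y ∉ done) : pvStA l done y = pvCnt l y := by
  unfold pvStA; rw [if_neg h, if_pos hy, if_neg hg, sub_zero]

lemma pvStA_val_pos_src (l done : List Int) (y : Int) (h : y ∉ done) (hy : ¬ y < 0)
    (hg : y ≠ 0 ∧ (2 : Int) ∣ y ∧ y / 2 ∈ l ∧ y / 2 ∈ done) :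
    pvStA l done y = pvCnt l y - pvU l (y / 2) := by
  unfold pvStA; rw [if_neg h, if_neg hy, if_pos hg]

lemma pvStA_val_pos_nosrc (l done : List Int) (y : Int) (h : y ∉ done) (hy : ¬ y < 0)
    (hg : ¬ (y ≠ 0 ∧ (2 : Int) ∣ y ∧ y / 2 ∈ l ∧ y / 2 ∈ done)) :
    pvStA l done y = pvCnt l y := by
  unfold pvStA; rw [if_neg h, if_neg hy, if_neg hg, sub_zero]

lemma pvHalf_nonneg (y : Int) (h : ¬ y < 0) : ¬ y / 2 < 0 := by
  have := Int.ediv_nonneg (a := y) (b := 2) (by omega) (by norm_num)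
  omega

-- A-state transfer when x's step is a skip
lemma pvStA_skip (l done : List Int) (x : Int) (hxdone : x ∉ done)
    (hz : pvStA l done x = 0) (hvz : x < 0 → pvV l x = 0) (huz : ¬ x < 0 → pvU l x = 0) :
    ∀ y, pvStA l (done ++ [x]) y = pvStA l done y := by
  intro y
  by_cases hyx : y = x
  · subst hyx
    rw [hz, pvStA_val_mem l _ y (by simp)]
  · by_cases hmem : y ∈ done
    · rw [pvStA_val_mem l _ y (by simp [hmem]), pvStA_val_mem l _ y hmem]
    · have hmem' : y ∉ done ++ [x] := by simp [hyx, hmem]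
      by_cases hy : y < 0
      · by_cases hgd : 2 * y ∈ done
        · rw [pvStA_val_neg_src l _ y hmem' hy (by simp [hgd]),
            pvStA_val_neg_src l _ y hmem hy hgd]
        · by_cases hgx : 2 * y = x
          · rw [pvStA_val_neg_src l _ y hmem' hy (by simp [hgx]),
              pvStA_val_neg_nosrc l _ y hmem hy hgd, hgx, hvz (by omega), sub_zero]
          · rw [pvStA_val_neg_nosrc l _ y hmem' hy (by
                intro hc
                rcases List.mem_append.mp hc with h | h
                · exact hgd h
                · exact hgx (List.mem_singleton.mp h)),
              pvStA_val_neg_nosrc l _ y hmem hy hgd]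
      · by_cases hg : y ≠ 0 ∧ (2 : Int) ∣ y ∧ y / 2 ∈ l
        · by_cases hyd : y / 2 ∈ done
          · rw [pvStA_val_pos_src l _ y hmem' hy ⟨hg.1, hg.2.1, hg.2.2, by simp [hyd]⟩,
              pvStA_val_pos_src l _ y hmem hy ⟨hg.1, hg.2.1, hg.2.2, hyd⟩]
          · by_cases hyx2 : y / 2 = x
            · rw [pvStA_val_pos_src l _ y hmem' hy ⟨hg.1, hg.2.1, hg.2.2, by simp [hyx2]⟩,
                pvStA_val_pos_nosrc l _ y hmem hy (by tauto), hyx2,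
                huz (by rw [← hyx2]; exact pvHalf_nonneg y hy), sub_zero]
            · rw [pvStA_val_pos_nosrc l _ y hmem' hy (by
                  intro ⟨h0, h2, hl2, hmem2⟩
                  rcases List.mem_append.mp hmem2 with h | h
                  · exact hyd h
                  · exact hyx2 (List.mem_singleton.mp h)),
                pvStA_val_pos_nosrc l _ y hmem hy (by tauto)]
        · rw [pvStA_val_pos_nosrc l _ y hmem' hy (by tauto),
            pvStA_val_pos_nosrc l _ y hmem hy (by tauto)]

-- A-state transfer when a negative x passes and pushes its residual into x/2
lemma pvStA_pass_neg (l done : List Int) (x : Int) (hx : x < 0) (h2 : (2 : Int) ∣ x)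
    (hxdone : x ∉ done) (hhalfdone : x / 2 ∉ done) :
    ∀ y, pvStA l (done ++ [x]) y =
      if y = x then 0
      else if y = x / 2 then pvCnt l (x / 2) - pvV l x else pvStA l done y := by
  intro y
  have hx2x : x / 2 ≠ x := by
    intro hc
    have := pvHalf_gt x hx h2
    omega
  by_cases hyx : y = x
  · subst hyx
    rw [if_pos rfl, pvStA_val_mem l _ y (by simp)]
  · rw [if_neg hyx]
    by_cases hyh : y = x / 2
    · subst hyh
      rw [if_pos rfl,
        pvStA_val_neg_src l _ (x / 2) (by simp [hx2x]; exact hhalfdone)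
          (pvHalf_neg x hx h2) (by rw [pvHalf_mul x h2]; simp),
        pvHalf_mul x h2]
    · rw [if_neg hyh]
      by_cases hmem : y ∈ done
      · rw [pvStA_val_mem l _ y (by simp [hmem]), pvStA_val_mem l _ y hmem]
      · have hmem' : y ∉ done ++ [x] := by simp [hyx, hmem]
        by_cases hy : y < 0
        · have hgx : 2 * y ≠ x := by
            intro hc
            apply hyh
            rw [← hc, pvDouble_div]
          by_cases hgd : 2 * y ∈ done
          · rw [pvStA_val_neg_src l _ y hmem' hy (by simp [hgd]),
              pvStA_val_neg_src l _ y hmem hy hgd]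
          · rw [pvStA_val_neg_nosrc l _ y hmem' hy (by
                intro hc
                rcases List.mem_append.mp hc with h | h
                · exact hgd h
                · exact hgx (List.mem_singleton.mp h)),
              pvStA_val_neg_nosrc l _ y hmem hy hgd]
        · have hyx2 : ∀ h0 : y ≠ 0, y / 2 ≠ x := by
            intro h0 hc
            have := pvHalf_nonneg y hy
            omega
          by_cases hg : y ≠ 0 ∧ (2 : Int) ∣ y ∧ y / 2 ∈ l ∧ y / 2 ∈ done
          · rw [pvStA_val_pos_src l _ y hmem' hy ⟨hg.1, hg.2.1, hg.2.2.1, by simp [hg.2.2.2]⟩,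
              pvStA_val_pos_src l _ y hmem hy hg]
          · rw [pvStA_val_pos_nosrc l _ y hmem' hy (by
                intro ⟨h0, h2', hl2, hmem2⟩
                rcases List.mem_append.mp hmem2 with h | h
                · exact hg ⟨h0, h2', hl2, h⟩
                · exact hyx2 h0 (List.mem_singleton.mp h)),
              pvStA_val_pos_nosrc l _ y hmem hy hg]

-- A-state transfer when a positive x passes and pushes its residual into 2x
lemma pvStA_pass_pos (l done : List Int) (x : Int) (hx : ¬ x < 0) (hx0 : x ≠ 0) (hxl : x ∈ l)
    (hxdone : x ∉ done) (h2xdone : 2 * x ∉ done) :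
    ∀ y, pvStA l (done ++ [x]) y =
      if y = x then 0
      else if y = 2 * x then pvCnt l (2 * x) - pvU l x else pvStA l done y := by
  intro y
  by_cases hyx : y = x
  · subst hyx
    rw [if_pos rfl, pvStA_val_mem l _ y (by simp)]
  · rw [if_neg hyx]
    by_cases hy2x : y = 2 * x
    · subst hy2x
      rw [if_pos rfl,
        pvStA_val_pos_src l _ (2 * x) (by simp [hyx]; exact h2xdone) (by omega)
          ⟨by omega, ⟨x, rfl⟩, by rw [pvDouble_div]; exact hxl, by rw [pvDouble_div]; simp⟩,
        pvDouble_div]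
    · rw [if_neg hy2x]
      by_cases hmem : y ∈ done
      · rw [pvStA_val_mem l _ y (by simp [hmem]), pvStA_val_mem l _ y hmem]
      · have hmem' : y ∉ done ++ [x] := by simp [hyx, hmem]
        by_cases hy : y < 0
        · have hgx : 2 * y ≠ x := by intro hc; omega
          by_cases hgd : 2 * y ∈ done
          · rw [pvStA_val_neg_src l _ y hmem' hy (by simp [hgd]),
              pvStA_val_neg_src l _ y hmem hy hgd]
          · rw [pvStA_val_neg_nosrc l _ y hmem' hy (by
                intro hc
                rcases List.mem_append.mp hc with h | h
                · exact hgd h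
                · exact hgx (List.mem_singleton.mp h)),
              pvStA_val_neg_nosrc l _ y hmem hy hgd]
        · have hnx2 : y ≠ 0 → (2 : Int) ∣ y → y / 2 ≠ x := by
            intro h0 h2 hc
            apply hy2x
            rw [← hc, pvHalf_mul y h2]
          by_cases hg : y ≠ 0 ∧ (2 : Int) ∣ y ∧ y / 2 ∈ l ∧ y / 2 ∈ done
          · rw [pvStA_val_pos_src l _ y hmem' hy ⟨hg.1, hg.2.1, hg.2.2.1, by simp [hg.2.2.2]⟩,
              pvStA_val_pos_src l _ y hmem hy hg]
          · rw [pvStA_val_pos_nosrc l _ y hmem' hy (by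
                intro ⟨h0, h2, hl2, hmem2⟩
                rcases List.mem_append.mp hmem2 with h | h
                · exact hg ⟨h0, h2, hl2, h⟩
                · exact hnx2 h0 h2 (List.mem_singleton.mp h)),
              pvStA_val_pos_nosrc l _ y hmem hy hg]

-- contains-facts survive the double insert of two existing keys
lemma pvContains_insert2 (l : List Int) (d : PySem.Dict Int Int) (a b va vb : Int)
    (hcont : ∀ z, d.contains z = true ↔ z ∈ l) (ha : a ∈ l) (hb : b ∈ l) :
    ∀ z, ((d.insert a va).insert b vb).contains z = true ↔ z ∈ l := by
  intro z
  rw [PySem.Dict.contains_insert, PySem.Dict.contains_insert]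
  simp only [Bool.or_eq_true, beq_iff_eq]
  constructor
  · rintro (rfl | rfl | h)
    · exact hb
    · exact ha
    · exact (hcont z).mp h
  · intro hz
    exact Or.inr (Or.inr ((hcont z).mpr hz))

-- ===== the A-pass invariant =====
lemma pvAinv (l : List Int) (hD : ∀ z ∈ l, (-2147483648 : Int) ≤ z) :
    ∀ (todo done : List Int) (d : PySem.Dict Int Int),
    pvKsA l = done ++ todo →
    (∀ y ∈ done, pvCondA l y) →
    (∀ y, d.getD y 0 = pvStA l done y) →
    (∀ z, d.contains z = true ↔ z ∈ l) →
    ((todo.foldl pvStepA (some d)).isSome = true ↔ ∀ y ∈ todo, pvCondA l y) := by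
  intro todo
  induction todo with
  | nil => intro done d _ _ _ _; simp
  | cons x rest ih =>
    intro done d hks hdone hst hcont
    have hnd : (done ++ x :: rest).Nodup := by rw [← hks]; exact pvKsA_nodup l
    have hpw : (done ++ x :: rest).Pairwise (· < ·) := by
      rw [← hks]; exact pvKsA_pairwise l
    have hxl : x ∈ l := (pvKsA_mem l x).mp (by rw [hks]; simp)
    have hxdone : x ∉ done := by
      intro hc
      rw [List.nodup_append] at hnd
      exact hnd.2.2 x hc x (by simp) rfl
    have hdonel : ∀ a ∈ done, a ∈ l := by
      intro a ha
      exact (pvKsA_mem l a).mp (by rw [hks]; exact List.mem_append.mpr (Or.inl ha))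
    have hdoneLt : ∀ a ∈ done, a < x := by
      intro a ha
      exact (List.pairwise_append.mp hpw).2.2 a ha x (by simp)
    have hrestGt : ∀ b ∈ rest, x < b := by
      have h1 := (List.pairwise_append.mp hpw).2.1
      exact (List.pairwise_cons.mp h1).1
    have hksx : pvKsA l = (done ++ [x]) ++ rest := by rw [hks]; simp
    have hdonex : pvCondA l x → ∀ y ∈ done ++ [x], pvCondA l y := by
      intro hcx y hy
      rcases List.mem_append.mp hy with h | h
      · exact hdone y h
      · rw [List.mem_singleton.mp h]; exact hcx
    simp only [List.foldl_cons]
    by_cases hneg : x < 0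
    · -- negative key
      have hsrcdone : 2 * x ∈ l → 2 * x ∈ done := by
        intro hl2
        have hmem : 2 * x ∈ done ++ x :: rest := by
          rw [← hks]; exact (pvKsA_mem l _).mpr hl2
        rcases List.mem_append.mp hmem with h | h
        · exact h
        · rcases List.mem_cons.mp h with h | h
          · exfalso; omega
          · exfalso; have := hrestGt _ h; omega
      have hsx : pvStA l done x = pvV l x := by
        rw [pvV_eq l hD x hneg]
        by_cases hm : 2 * x ∈ l
        · rw [pvStA_val_neg_src l done x hxdone hneg (hsrcdone hm), if_pos hm]
        · rw [pvStA_val_neg_nosrc l done x hxdone hneg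
              (fun hc => hm (hdonel _ hc)), if_neg hm, sub_zero]
      have hcur : d.getD x 0 = pvV l x := by rw [hst x, hsx]
      have hvnn : 0 ≤ pvV l x := by
        refine pvV_nonneg l hD x hneg (fun hm => ?_)
        have hc := hdone (2 * x) (hsrcdone hm)
        unfold pvCondA at hc
        rw [if_pos (by omega : 2 * x < 0), if_pos ⟨x, rfl⟩, pvDouble_div] at hc
        exact hc
      by_cases hz : pvV l x = 0
      · -- skip
        have hcondx : pvCondA l x := by
          unfold pvCondA
          rw [if_pos hneg, hz]
          have := pvCnt_nonneg l (x / 2)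
          split <;> omega
        have hstep : pvStepA (some d) x = some d := by
          simp only [pvStepA]
          rw [if_pos (by rw [hcur, hz])]
        rw [hstep,
          ih (done ++ [x]) d hksx (hdonex hcondx)
            (fun y => by
              rw [hst y, ← pvStA_skip l done x hxdone (by rw [hsx, hz])
                (fun _ => hz) (fun h => absurd hneg h) y])
            hcont]
        exact pvForall_cons x rest hcondx
      · by_cases h2 : (2 : Int) ∣ x
        · have hmod : PySem.Int.mod x 2 = 0 := (PySem.Int.mod_eq_zero_iff_dvd x 2).mpr h2
          have hfd : PySem.Int.floordiv x 2 = x / 2 :=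
            PySem.Int.floordiv_eq_ediv_of_pos (by norm_num)
          by_cases hhl : x / 2 ∈ l
          · have hhalfdone : x / 2 ∉ done := by
              intro hc
              have h1 := hdoneLt _ hc
              have := pvHalf_gt x hneg h2
              omega
            have hgethalf : d.getD (x / 2) 0 = pvCnt l (x / 2) := by
              rw [hst, pvStA_val_neg_nosrc l done (x / 2) hhalfdone (pvHalf_neg x hneg h2)
                (by rw [pvHalf_mul x h2]; exact hxdone)]
            by_cases hlt : pvCnt l (x / 2) < pvV l x
            · -- check fails
              have hstep : pvStepA (some d) x = none := by
                simp only [pvStepA]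
                rw [if_neg (by rw [hcur]; exact hz), if_pos hneg, if_neg (by rw [hmod]; omega),
                  if_neg (by rw [hfd]; simp [(hcont (x / 2)).mpr hhl]),
                  if_pos (by rw [hfd, hgethalf, hcur]; exact hlt)]
              rw [hstep, pvFoldA_none]
              simp only [Option.isSome_none, Bool.false_eq_true, false_iff]
              intro H
              have := H x (by simp)
              unfold pvCondA at this
              rw [if_pos hneg, if_pos h2] at this
              omega
            · -- check passes
              have hcondx : pvCondA l x := by
                unfold pvCondA
                rw [if_pos hneg, if_pos h2]
                omega
              have hstep : pvStepA (some d) x =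
                  some ((d.insert (x / 2) (d.getD (x / 2) 0 - d.getD x 0)).insert x 0) := by
                simp only [pvStepA]
                rw [if_neg (by rw [hcur]; exact hz), if_pos hneg, if_neg (by rw [hmod]; omega),
                  if_neg (by rw [hfd]; simp [(hcont (x / 2)).mpr hhl]),
                  if_neg (by rw [hfd, hgethalf, hcur]; omega), hfd]
              rw [hstep,
                ih (done ++ [x]) _ hksx (hdonex hcondx)
                  (fun y => by
                    rw [pvGetD_insert2, pvStA_pass_neg l done x hneg h2 hxdone hhalfdone y]
                    by_cases hyx : y = x
                    · simp [hyx]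
                    · rw [if_neg hyx, if_neg hyx]
                      by_cases hyh : y = x / 2
                      · rw [if_pos hyh, if_pos hyh, hgethalf, hcur]
                      · rw [if_neg hyh, if_neg hyh, hst y])
                  (pvContains_insert2 l d (x / 2) x _ _ hcont hhl hxl)]
              exact pvForall_cons x rest hcondx
          · -- x/2 not a key: the membership test fails
            have hstep : pvStepA (some d) x = none := by
              simp only [pvStepA]
              rw [if_neg (by rw [hcur]; exact hz), if_pos hneg, if_neg (by rw [hmod]; omega),
                if_pos (by
                  rw [hfd]
                  have h' : ¬ d.contains (x / 2) = true := fun hc => hhl ((hcont (x / 2)).mp hc)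
                  simpa using h')]
            rw [hstep, pvFoldA_none]
            simp only [Option.isSome_none, Bool.false_eq_true, false_iff]
            intro H
            have := H x (by simp)
            unfold pvCondA at this
            rw [if_pos hneg, if_pos h2, pvCnt_eq_zero l _ hhl] at this
            omega
        · -- odd negative with a positive count: parity test fails
          have hmod : PySem.Int.mod x 2 ≠ 0 := by
            intro hc
            exact h2 ((PySem.Int.mod_eq_zero_iff_dvd x 2).mp hc)
          have hstep : pvStepA (some d) x = none := by
            simp only [pvStepA]
            rw [if_neg (by rw [hcur]; exact hz), if_pos hneg, if_pos hmod]
          rw [hstep, pvFoldA_none]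
          simp only [Option.isSome_none, Bool.false_eq_true, false_iff]
          intro H
          have := H x (by simp)
          unfold pvCondA at this
          rw [if_pos hneg, if_neg h2] at this
          omega
    · -- nonnegative key
      have hsrcdone : x ≠ 0 → (2 : Int) ∣ x → x / 2 ∈ l → x / 2 ∈ done := by
        intro h0 h2 hl2
        have hlt : x / 2 < x := pvHalf_lt x (by omega)
        have hmem : x / 2 ∈ done ++ x :: rest := by
          rw [← hks]; exact (pvKsA_mem l _).mpr hl2
        rcases List.mem_append.mp hmem with h | h
        · exact h
        · rcases List.mem_cons.mp h with h | h
          · exfalso; omega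
          · exfalso; have := hrestGt _ h; omega
      have hsx : pvStA l done x = pvU l x := by
        by_cases hsrc : x ≠ 0 ∧ (2 : Int) ∣ x ∧ x / 2 ∈ l
        · rw [pvStA_val_pos_src l done x hxdone hneg
              ⟨hsrc.1, hsrc.2.1, hsrc.2.2, hsrcdone hsrc.1 hsrc.2.1 hsrc.2.2⟩]
          conv_rhs => rw [pvU_eq]
          rw [if_pos hsrc]
        · rw [pvStA_val_pos_nosrc l done x hxdone hneg (by tauto)]
          conv_rhs => rw [pvU_eq]
          rw [if_neg hsrc]
      have hcur : d.getD x 0 = pvU l x := by rw [hst x, hsx]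
      have hun : 0 ≤ pvU l x := by
        refine pvU_nonneg l x (fun h0 h2 hl2 => ?_)
        have hd' := hdone (x / 2) (hsrcdone h0 h2 hl2)
        unfold pvCondA at hd'
        rw [if_neg (by have := pvHalf_nonneg x hneg; omega), pvHalf_mul x h2] at hd'
        exact hd'
      by_cases hz : pvU l x = 0
      · -- skip
        have hcondx : pvCondA l x := by
          unfold pvCondA
          rw [if_neg hneg]
          have := pvCnt_nonneg l (2 * x)
          omega
        have hstep : pvStepA (some d) x = some d := by
          simp only [pvStepA]
          rw [if_pos (by rw [hcur, hz])]
        rw [hstep,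
          ih (done ++ [x]) d hksx (hdonex hcondx)
            (fun y => by
              rw [hst y, ← pvStA_skip l done x hxdone (by rw [hsx, hz])
                (fun h => absurd h hneg) (fun _ => hz) y])
            hcont]
        exact pvForall_cons x rest hcondx
      · have hmul : x * 2 = 2 * x := mul_comm x 2
        by_cases hx0 : x = 0
        · -- the key 0 always passes
          subst hx0
          have hu0 : pvU l 0 = pvCnt l 0 := by rw [pvU_eq, if_neg (by simp)]
          have hcondx : pvCondA l 0 := by
            unfold pvCondA
            rw [if_neg hneg, show (2 : Int) * 0 = 0 by norm_num]
            omega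
          have hget20 : d.getD (0 * 2) 0 = pvU l 0 := by
            rw [show (0 : Int) * 2 = 0 by norm_num]; exact hcur
          have hstep : pvStepA (some d) 0 =
              some ((d.insert (0 * 2) (d.getD (0 * 2) 0 - d.getD 0 0)).insert 0 0) := by
            simp only [pvStepA]
            rw [if_neg (by rw [hcur]; exact hz), if_neg hneg,
              if_neg (by rw [show (0 : Int) * 2 = 0 by norm_num]; simp [(hcont 0).mpr hxl]),
              if_neg (by rw [hget20, hcur]; omega)]
          rw [hstep,
            ih (done ++ [(0 : Int)]) _ hksx (hdonex hcondx)
              (fun y => by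
                rw [pvGetD_insert2]
                have hz0 : ∀ z, pvStA l (done ++ [(0 : Int)]) z =
                    if z = 0 then 0 else pvStA l done z := by
                  intro z
                  by_cases hz0 : z = 0
                  · subst hz0
                    rw [if_pos rfl, pvStA_val_mem l _ 0 (by simp)]
                  · rw [if_neg hz0]
                    by_cases hmem : z ∈ done
                    · rw [pvStA_val_mem l _ z (by simp [hmem]), pvStA_val_mem l _ z hmem]
                    · have hmem' : z ∉ done ++ [(0 : Int)] := by simp [hz0, hmem]
                      by_cases hzneg : z < 0
                      · have : (2 : Int) * z ≠ 0 := by omega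
                        by_cases hgd : 2 * z ∈ done
                        · rw [pvStA_val_neg_src l _ z hmem' hzneg (by simp [hgd]),
                            pvStA_val_neg_src l _ z hmem hzneg hgd]
                        · rw [pvStA_val_neg_nosrc l _ z hmem' hzneg (by
                              intro hc
                              rcases List.mem_append.mp hc with h | h
                              · exact hgd h
                              · exact this (List.mem_singleton.mp h)),
                            pvStA_val_neg_nosrc l _ z hmem hzneg hgd]
                      · by_cases hg : z ≠ 0 ∧ (2 : Int) ∣ z ∧ z / 2 ∈ l ∧ z / 2 ∈ done
                        · rw [pvStA_val_pos_src l _ z hmem' hzneg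
                              ⟨hg.1, hg.2.1, hg.2.2.1, by simp [hg.2.2.2]⟩,
                            pvStA_val_pos_src l _ z hmem hzneg hg]
                        · rw [pvStA_val_pos_nosrc l _ z hmem' hzneg (by
                              intro ⟨h0, h2', hl2, hmem2⟩
                              rcases List.mem_append.mp hmem2 with h | h
                              · exact hg ⟨h0, h2', hl2, h⟩
                              · exact pvHalfEqZero z h0 h2' (List.mem_singleton.mp h)),
                            pvStA_val_pos_nosrc l _ z hmem hzneg hg]
                rw [hz0 y]
                by_cases hy0 : y = 0
                · simp [hy0]
                · rw [if_neg hy0, if_neg hy0,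
                    if_neg (by rw [show (0 : Int) * 2 = 0 by norm_num]; exact hy0), hst y])
              (pvContains_insert2 l d (0 * 2) 0 _ _ hcont
                (by rw [show (0 : Int) * 2 = 0 by norm_num]; exact hxl) hxl)]
          exact pvForall_cons 0 rest hcondx
        · -- positive key with a positive count
          have h2xdone : 2 * x ∉ done := by
            intro hc
            have := hdoneLt _ hc
            omega
          by_cases h2xl : 2 * x ∈ l
          · have hget2x : d.getD (2 * x) 0 = pvCnt l (2 * x) := by
              rw [hst, pvStA_val_pos_nosrc l done (2 * x) h2xdone (by omega) (by
                intro ⟨_, _, _, hc⟩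
                rw [pvDouble_div] at hc
                exact hxdone hc)]
            by_cases hcond : pvCnt l (2 * x) < pvU l x
            · -- check fails
              have hstep : pvStepA (some d) x = none := by
                simp only [pvStepA]
                rw [if_neg (by rw [hcur]; exact hz), if_neg hneg,
                  if_neg (by rw [hmul]; simp [(hcont (2 * x)).mpr h2xl]),
                  if_pos (by rw [hmul, hget2x, hcur]; exact hcond)]
              rw [hstep, pvFoldA_none]
              simp only [Option.isSome_none, Bool.false_eq_true, false_iff]
              intro H
              have := H x (by simp)
              unfold pvCondA at this
              rw [if_neg hneg] at this
              omega
            · -- check passes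
              have hcondx : pvCondA l x := by
                unfold pvCondA
                rw [if_neg hneg]
                omega
              have hstep : pvStepA (some d) x =
                  some ((d.insert (x * 2) (d.getD (x * 2) 0 - d.getD x 0)).insert x 0) := by
                simp only [pvStepA]
                rw [if_neg (by rw [hcur]; exact hz), if_neg hneg,
                  if_neg (by rw [hmul]; simp [(hcont (2 * x)).mpr h2xl]),
                  if_neg (by rw [hmul, hget2x, hcur]; omega)]
              rw [hstep,
                ih (done ++ [x]) _ hksx (hdonex hcondx)
                  (fun y => by
                    rw [pvGetD_insert2, hmul,
                      pvStA_pass_pos l done x hneg hx0 hxl hxdone h2xdone y]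
                    by_cases hyx : y = x
                    · simp [hyx]
                    · rw [if_neg hyx, if_neg hyx]
                      by_cases hy2x : y = 2 * x
                      · rw [if_pos hy2x, if_pos hy2x, hget2x, hcur]
                      · rw [if_neg hy2x, if_neg hy2x, hst y])
                  (by rw [hmul]; exact pvContains_insert2 l d (2 * x) x _ _ hcont h2xl hxl)]
              exact pvForall_cons x rest hcondx
          · -- 2x not a key: the membership test fails
            have hstep : pvStepA (some d) x = none := by
              simp only [pvStepA]
              rw [if_neg (by rw [hcur]; exact hz), if_neg hneg,
                if_pos (by
                  rw [hmul]
                  have h' : ¬ d.contains (2 * x) = true := fun hc => h2xl ((hcont (2 * x)).mp hc)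
                  simpa using h')]
            rw [hstep, pvFoldA_none]
            simp only [Option.isSome_none, Bool.false_eq_true, false_iff]
            intro H
            have := H x (by simp)
            unfold pvCondA at this
            rw [if_neg hneg, pvCnt_eq_zero l _ h2xl] at this
            omega

-- ===== closed-form characterization of the two ports =====
lemma pvMatch_isSome (o : Option (PySem.Dict Int Int)) :
    (match o with | none => false | some _ => true) = o.isSome := by cases o <;> rfl

-- B's residual over the counter is exactly the abstract chain residual pvU
lemma pvResidual_eq_aux (l : List Int) :
    ∀ (n : Nat) (x : Int), x.natAbs ≤ n → pvResidual (PySem.Dict.counter l) x = pvU l x := by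
  intro n
  induction n with
  | zero =>
    intro x hx
    have hx0 : x = 0 := by omega
    subst hx0
    rw [pvResidual, pvU_eq]
    rw [dif_neg (by simp), if_neg (by simp), PySem.Dict.getD_counter]
    rfl
  | succ n ih =>
    intro x hx
    rw [pvResidual, pvU_eq]
    by_cases hg : x ≠ 0 ∧ (2 : Int) ∣ x ∧ x / 2 ∈ l
    · obtain ⟨h0, h2, hl2⟩ := hg
      have hmod : PySem.Int.mod x 2 = 0 := (PySem.Int.mod_eq_zero_iff_dvd x 2).mpr h2
      have hfd : PySem.Int.floordiv x 2 = x / 2 :=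
        PySem.Int.floordiv_eq_ediv_of_pos (by norm_num)
      have hcont : (PySem.Dict.counter l).contains (PySem.Int.floordiv x 2) = true := by
        rw [hfd, PySem.Dict.contains_counter]; simpa using hl2
      rw [dif_pos ⟨h0, hmod, hcont⟩, if_pos ⟨h0, h2, hl2⟩, hfd,
        PySem.Dict.getD_counter]
      have habs : (x / 2).natAbs < x.natAbs := by
        obtain ⟨k, hk⟩ := h2; subst hk
        rw [pvDouble_div, Int.natAbs_mul]
        have : k.natAbs ≠ 0 := by simp [Int.natAbs_eq_zero]; omega
        simp; omega
      rw [ih (x / 2) (by omega)]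
      rfl
    · have hng : ¬ (x ≠ 0 ∧ PySem.Int.mod x 2 = 0 ∧
          (PySem.Dict.counter l).contains (PySem.Int.floordiv x 2) = true) := by
        intro ⟨h0, hmod, hcont⟩
        have h2 : (2 : Int) ∣ x := (PySem.Int.mod_eq_zero_iff_dvd x 2).mp hmod
        have hfd : PySem.Int.floordiv x 2 = x / 2 :=
          PySem.Int.floordiv_eq_ediv_of_pos (by norm_num)
        rw [hfd, PySem.Dict.contains_counter] at hcont
        exact hg ⟨h0, h2, by simpa using hcont⟩
      rw [dif_neg hng, if_neg hg, PySem.Dict.getD_counter]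
      rfl

lemma pvB_char (l : List Int) :
    canReorderDoubled_alt l = true ↔ ∀ y ∈ l, pvCondB l y := by
  unfold canReorderDoubled_alt
  simp only [PySem.Dict.keys_counter]
  rw [List.all_eq_true]
  constructor
  · intro H y hy
    have := H y ((PySem.Set.mem_ofList l y).mpr hy)
    unfold pvCondB
    rw [pvResidual_eq_aux l y.natAbs y le_rfl, PySem.Dict.getD_counter] at *
    simpa [pvCnt] using this
  · intro H y hy
    have hc := H y ((PySem.Set.mem_ofList l y).mp hy)
    unfold pvCondB at hc
    rw [pvResidual_eq_aux l y.natAbs y le_rfl] at *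
    simp only [decide_eq_true_eq, PySem.Dict.getD_counter]
    simpa [pvCnt] using hc

lemma pvA_char (l : List Int) (hD : ∀ z ∈ l, (-2147483648 : Int) ≤ z) :
    canReorderDoubled l = true ↔ ∀ y ∈ l, pvCondA l y := by
  have hport : canReorderDoubled l
      = ((pvKsA l).foldl pvStepA (some (PySem.Dict.counter l))).isSome := by
    unfold canReorderDoubled pvKsA
    simp only [PySem.Dict.keys_counter]
    exact pvMatch_isSome _
  rw [hport,
    pvAinv l hD (pvKsA l) [] (PySem.Dict.counter l) (by simp) (by simp)
      (fun y => by rw [PySem.Dict.getD_counter]; simp [pvStA, pvCnt])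
      (fun z => by rw [PySem.Dict.contains_counter]; simp)]
  constructor
  · intro H y hy; exact H y ((pvKsA_mem l y).mpr hy)
  · intro H y hy; exact H y ((pvKsA_mem l y).mp hy)

-- ===== the bridge: A's conditions ↔ B's conditions =====
lemma pvU_nonneg_glob (l : List Int) (HB : ∀ z ∈ l, z < 0 → pvCondB l z) (z : Int)
    (hz : z < 0) : 0 ≤ pvU l z := by
  refine pvU_nonneg l z (fun h0 h2 hl => ?_)
  have hc := HB (z / 2) hl (pvHalf_neg z hz h2)
  unfold pvCondB at hc
  rwa [pvHalf_mul z h2] at hc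

lemma pvU_le_cnt (l : List Int) (HB : ∀ z ∈ l, z < 0 → pvCondB l z) (z : Int)
    (hz : z < 0) : pvU l z ≤ pvCnt l z := by
  rw [pvU_eq]
  split
  · next h =>
    have := pvU_nonneg_glob l HB (z / 2) (pvHalf_neg z hz h.2.1)
    omega
  · exact le_refl _

lemma pvV_nonneg_glob (l : List Int) (hD : ∀ z ∈ l, (-2147483648 : Int) ≤ z)
    (HA : ∀ z ∈ l, z < 0 → pvCondA l z) (z : Int) (hz : z < 0) : 0 ≤ pvV l z := by
  refine pvV_nonneg l hD z hz (fun hm => ?_)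
  have hc := HA (2 * z) hm (by omega)
  unfold pvCondA at hc
  rw [if_pos (by omega : 2 * z < 0), if_pos ⟨z, rfl⟩, pvDouble_div] at hc
  exact hc

lemma pvV_le_cnt (l : List Int) (hD : ∀ z ∈ l, (-2147483648 : Int) ≤ z)
    (HA : ∀ z ∈ l, z < 0 → pvCondA l z) (z : Int) (hz : z < 0) : pvV l z ≤ pvCnt l z := by
  rw [pvV_eq l hD z hz]
  split
  · next h =>
    have := pvV_nonneg_glob l hD HA (2 * z) (by omega)
    omega
  · exact le_refl _

-- under B's conditions on the negatives, v = cnt - u there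
lemma pvVU_aux (l : List Int) (hD : ∀ z ∈ l, (-2147483648 : Int) ≤ z)
    (HB : ∀ z ∈ l, z < 0 → pvCondB l z) :
    ∀ (d : Nat) (y : Int), y ∈ l → y < 0 → 2 ^ d * y < -2147483648 →
      pvV l y = pvCnt l y - pvU l y := by
  intro d
  induction d with
  | zero =>
    intro y hyl hy hbound
    exfalso
    have := hD y hyl
    simp only [pow_zero, one_mul] at hbound
    omega
  | succ d ih =>
    intro y hyl hy hbound
    rw [pvV_eq l hD y hy]
    by_cases hm : 2 * y ∈ l
    · rw [if_pos hm]
      have hrec := ih (2 * y) hm (by omega)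
        (by rw [pow_succ] at hbound; rw [← mul_assoc]; exact hbound)
      have hu2y : pvU l (2 * y) = pvCnt l (2 * y) - pvU l y := by
        rw [pvU_eq, if_pos ⟨by omega, ⟨y, rfl⟩, by rw [pvDouble_div]; exact hyl⟩, pvDouble_div]
      omega
    · rw [if_neg hm]
      have hub := HB y hyl hy
      unfold pvCondB at hub
      have hc0 : pvCnt l (2 * y) = 0 := pvCnt_eq_zero l _ hm
      have hun := pvU_nonneg_glob l HB y hy
      omega

lemma pvBridge_BA (l : List Int) (hD : ∀ z ∈ l, (-2147483648 : Int) ≤ z)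
    (HB : ∀ z ∈ l, z < 0 → pvCondB l z) : ∀ y ∈ l, y < 0 → pvCondA l y := by
  intro y hyl hy
  have hid := pvVU_aux l hD HB 33 y hyl hy
    (by have h33 : (2 : Int) ^ 33 = 8589934592 := by norm_num
        rw [h33]; omega)
  unfold pvCondA
  rw [if_pos hy, hid, pvU_eq]
  by_cases hsrc : y ≠ 0 ∧ (2 : Int) ∣ y ∧ y / 2 ∈ l
  · rw [if_pos hsrc, if_pos hsrc.2.1]
    have hle := pvU_le_cnt l HB (y / 2) (pvHalf_neg y hy hsrc.2.1)
    omega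
  · rw [if_neg hsrc]
    have h1 := pvCnt_nonneg l (y / 2)
    split <;> omega

-- under A's conditions on the negatives, u = cnt - v there
lemma pvUV_aux (l : List Int) (hD : ∀ z ∈ l, (-2147483648 : Int) ≤ z)
    (HA : ∀ z ∈ l, z < 0 → pvCondA l z) :
    ∀ (n : Nat) (y : Int), y ∈ l → y < 0 → y.natAbs ≤ n →
      pvU l y = pvCnt l y - pvV l y := by
  intro n
  induction n with
  | zero => intro y _ hy hn; exfalso; omega
  | succ n ih =>
    intro y hyl hy hn
    rw [pvU_eq]
    by_cases hsrc : y ≠ 0 ∧ (2 : Int) ∣ y ∧ y / 2 ∈ l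
    · rw [if_pos hsrc]
      obtain ⟨h0, h2, hl⟩ := hsrc
      have hyh : y / 2 < 0 := pvHalf_neg y hy h2
      have habs : (y / 2).natAbs < y.natAbs := by
        obtain ⟨k, hk⟩ := h2; subst hk
        rw [pvDouble_div, Int.natAbs_mul]
        have : k.natAbs ≠ 0 := by simp [Int.natAbs_eq_zero]; omega
        simp; omega
      have hrec := ih (y / 2) hl hyh (by omega)
      have hv2 : pvV l (y / 2) = pvCnt l (y / 2) - pvV l y := by
        rw [pvV_eq l hD (y / 2) hyh, pvHalf_mul y h2, if_pos hyl]
      omega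
    · rw [if_neg hsrc]
      have h1 : pvV l y ≤ 0 := by
        have hc := HA y hyl hy
        unfold pvCondA at hc
        rw [if_pos hy] at hc
        by_cases h2 : (2 : Int) ∣ y
        · rw [if_pos h2] at hc
          have hnl : y / 2 ∉ l := fun hmem => hsrc ⟨by omega, h2, hmem⟩
          rw [pvCnt_eq_zero l _ hnl] at hc
          exact hc
        · rwa [if_neg h2] at hc
      have h2 := pvV_nonneg_glob l hD HA y hy
      omega

lemma pvBridge_AB (l : List Int) (hD : ∀ z ∈ l, (-2147483648 : Int) ≤ z)
    (HA : ∀ z ∈ l, z < 0 → pvCondA l z) : ∀ y ∈ l, y < 0 → pvCondB l y := by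
  intro y hyl hy
  have hid := pvUV_aux l hD HA y.natAbs y hyl hy le_rfl
  rw [pvV_eq l hD y hy] at hid
  unfold pvCondB
  by_cases hm : 2 * y ∈ l
  · rw [if_pos hm] at hid
    have := pvV_le_cnt l hD HA (2 * y) (by omega)
    omega
  · rw [if_neg hm] at hid
    have := pvCnt_nonneg l (2 * y)
    omega

lemma pvLowerBound (A : List Int) (h : Dom_canReorderDoubled A) :
    ∀ z ∈ A, (-2147483648 : Int) ≤ z := by
  intro z hz
  unfold Dom_canReorderDoubled at h
  rw [List.all_eq_true] at h
  have := h z hz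
  simp [pvDomInt] at this
  omega

-- ===== VERDICT (by name: the statement is the Claim_ definition above) =====
theorem canReorderDoubled_spec : Claim_equal_canReorderDoubled := by
  intro A hDom
  have hD := pvLowerBound A hDom
  unfold Spec_canReorderDoubled
  rw [Bool.eq_iff_iff, pvA_char A hD, pvB_char A]
  constructor
  · intro H y hy
    by_cases hneg : y < 0
    · exact pvBridge_AB A hD (fun z hz _ => H z hz) y hy hneg
    · have := H y hy; unfold pvCondA at this; rw [if_neg hneg] at this; exact this
  · intro H y hy
    by_cases hneg : y < 0
    · exact pvBridge_BA A hD (fun z hz _ => H z hz) y hy hneg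
    · unfold pvCondA; rw [if_neg hneg]; exact H y hy
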